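-- pv_equiv track=rewrite | github.com/RiflerRick/SnackDown17NU | SnakeEating.py | answer
-- ===== SOURCE A (Python) =====
-- def answer(lengthList, k):
--     # lengthList is a list of lengths of all the snakes
--     num=0
--     index=0
--     while index<len(lengthList):
--         if lengthList[index]>=k:
--             num+=1
--
--             # pop the length of the snake that is already going to be greater than k
--
--             lengthList.pop(index)
--             continue
--         index+=1
--
--     # sorting the list in ascending order
--     lengthList.sort()
--     index=len(lengthList)-1
--     while index>0:
--         # traversing the list from back to front
--         if lengthList[index]==k:
--             num+=1
--             lengthList.pop(index)
--             index-=1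
--
--         else:
--             lengthList[index]+=1
--             lengthList.pop(index-1)
--             index-=1
--
--     # here we will land at index=0
--     if lengthList[index]==k:
--         num+=1
--
--     return num
-- ===== SOURCE B (Python) =====
-- def answer(lengthList, k):
--     # One pass filter + sort, then jump over eaten snakes in blocks instead of
--     # simulating each single merge (A mutates lengthList in place; B does not —
--     # equivalence is about the return value only).
--     small = sorted(x for x in lengthList if x < k)
--     num = len(lengthList) - len(small)
--     while small:
--         need = k - small[-1]          # merges the top snake still needs to reach k
--         if need > len(small) - 1:     # not enough snakes below to eat
--             break
--         num += 1
--         del small[len(small) - need - 1:]   # the top snake and the `need` it ate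
--     return num
-- ===== Notes on version B (the rewrite author's own statement) =====
-- stated objective: faster
-- what changed: Instead of A's mutate-and-pop simulation of every single merge (quadratic pops over the list), B filters out the >=k snakes in one pass, sorts the rest once, and consumes the eaten snakes in whole blocks of size k-top per surviving snake via slicing.
import Mathlib
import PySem

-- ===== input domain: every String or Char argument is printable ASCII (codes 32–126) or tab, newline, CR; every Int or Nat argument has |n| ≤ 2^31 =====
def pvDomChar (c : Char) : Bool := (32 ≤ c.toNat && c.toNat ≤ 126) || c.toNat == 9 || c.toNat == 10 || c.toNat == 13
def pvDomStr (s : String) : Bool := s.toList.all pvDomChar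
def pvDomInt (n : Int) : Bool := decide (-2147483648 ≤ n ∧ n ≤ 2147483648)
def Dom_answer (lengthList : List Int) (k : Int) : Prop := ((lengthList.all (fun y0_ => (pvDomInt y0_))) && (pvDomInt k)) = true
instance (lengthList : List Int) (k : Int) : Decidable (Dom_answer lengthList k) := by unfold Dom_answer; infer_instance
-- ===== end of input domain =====

-- B replaces A's mutate-and-pop per-merge simulation by filter + one sort + block jumps
-- (objective: faster). A mutates lengthList in place, B does not; the equivalence proved
-- here is about the return value only.

-- ===== PORT A =====
-- first while loop: pop out (and count) every snake already >= k
def answerLoop1 (k : Int) (xs : List Int) (index : Nat) (num : Int) : List Int × Int :=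
  if h : index < xs.length then
    if k ≤ xs[index] then
      answerLoop1 k (xs.eraseIdx index) index (num + 1)
    else
      answerLoop1 k xs (index + 1) num
  else (xs, num)
termination_by xs.length - index
decreasing_by
  · have := List.length_eraseIdx_of_lt h; omega
  · omega

-- second while loop: from back to front, merge (or count and pop) snakes
def answerLoop2 (k : Int) (xs : List Int) (index : Int) (num : Int) : List Int × Int × Int :=
  if h : 0 < index then
    if PySem.List.pyGetD xs index 0 = k then
      answerLoop2 k (((PySem.List.pop? xs index).map Prod.snd).getD xs) (index - 1) (num + 1)
    else
      answerLoop2 k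
        (((PySem.List.pop? (PySem.List.pySetD xs index (PySem.List.pyGetD xs index 0 + 1)) (index - 1)).map Prod.snd).getD xs)
        (index - 1) num
  else (xs, index, num)
termination_by index.toNat
decreasing_by
  · omega
  · omega

-- final 'if lengthList[index]==k: num+=1' and 'return num' (none = A's IndexError, excluded by Pre_)
def answerFinish (k : Int) (r : List Int × Int × Int) : Int :=
  match PySem.List.pyGet? r.1 r.2.1 with
  | some v => if v = k then r.2.2 + 1 else r.2.2
  | none => r.2.2

def answer (lengthList : List Int) (k : Int) : Int :=
  let r1 := answerLoop1 k lengthList 0 0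
  let m := PySem.List.sorted r1.1 (fun x => x) false
  answerFinish k (answerLoop2 k m (PySem.List.len m - 1) r1.2)

-- ===== PORT B =====
-- Source B's while loop; the hypothesis argument only makes the recursion total
-- (B always calls it on a list of snakes < k) and plays no computational role.
def answerAltLoop (k : Int) (small : List Int) (hk : ∀ x ∈ small, x ≤ k) (num : Int) : Int :=
  if hne : small = [] then num
  else
    let need := k - PySem.List.pyGetD small (-1) 0
    if hg : need > PySem.List.len small - 1 then num
    else
      answerAltLoop k (PySem.List.slice small none (some (PySem.List.len small - need - 1)))
        (fun x hx => hk x (PySem.List.mem_of_mem_slice _ _ _ hx)) (num + 1)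
termination_by small.length
decreasing_by
  have hlen : 0 < small.length := List.length_pos_iff.mpr hne
  have hmem : PySem.List.pyGetD small (-1) 0 ∈ small :=
    PySem.List.pyGetD_mem small 0 (by constructor <;> omega)
  have hlast := hk _ hmem
  have hneed : (0:Int) ≤ need := by
    show (0:Int) ≤ k - PySem.List.pyGetD small (-1) 0
    omega
  have hb : (0:Int) ≤ PySem.List.len small - need - 1 := by
    rw [PySem.List.len_eq] at hg ⊢; omega
  rw [PySem.List.slice_to _ hb]
  rw [PySem.List.len_eq] at hg ⊢
  simp only [List.length_take]
  omega

def answer_alt (lengthList : List Int) (k : Int) : Int :=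
  let small := PySem.List.sorted (lengthList.filter (fun x => decide (x < k))) (fun x => x) false
  answerAltLoop k small
    (fun x hx => le_of_lt (of_decide_eq_true
      (List.mem_filter.mp ((PySem.List.mem_sorted _ _ _ _).mp hx)).2))
    (PySem.List.len lengthList - PySem.List.len small)

-- ===== PRECONDITION & SPEC =====
-- Pre_ excludes exactly the inputs on which A raises IndexError (every snake already >= k,
-- so the second phase starts on an empty list and A reads lengthList[0] from it).
def Pre_answer (lengthList : List Int) (k : Int) : Prop := ∃ x ∈ lengthList, x < k
instance (lengthList : List Int) (k : Int) : Decidable (Pre_answer lengthList k) := by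
  unfold Pre_answer; infer_instance

def pvWitness_answer : List Int × Int := ([3, 1, 4, 2], 4)

def Spec_answer (lengthList : List Int) (k : Int) (out : Int) : Prop := out = answer_alt lengthList k
instance (lengthList : List Int) (k : Int) (out : Int) : Decidable (Spec_answer lengthList k out) := by
  unfold Spec_answer; infer_instance

-- ===== CLAIM (what is proved, stated in full; the proofs are below) =====
def Claim_equal_answer : Prop := ∀ (lengthList : List Int) (k : Int), Dom_answer lengthList k → Pre_answer lengthList k → Spec_answer lengthList k (answer lengthList k)

-- ===== LEMMAS AND PROOFS =====

-- abstract state of A's second loop: ys = the untouched snakes below, s = the top snake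
def phase2 (k : Int) (ys : List Int) (s num : Int) : Int :=
  if h : ys = [] then (if s = k then num + 1 else num)
  else if s = k then phase2 k ys.dropLast (ys.getLast h) (num + 1)
  else phase2 k ys.dropLast (s + 1) num
termination_by ys.length
decreasing_by
  all_goals (have := List.length_pos_iff.mpr h; simp [List.length_dropLast]; omega)

theorem altLoop_eq_of_eq {k : Int} {l1 l2 : List Int} {p1 : ∀ x ∈ l1, x ≤ k}
    {p2 : ∀ x ∈ l2, x ≤ k} {num : Int} (h : l1 = l2) :
    answerAltLoop k l1 p1 num = answerAltLoop k l2 p2 num := by subst h; rfl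

theorem altLoop_nil (k : Int) (l : List Int) (p : ∀ x ∈ l, x ≤ k) (num : Int) (h : l = []) :
    answerAltLoop k l p num = num := by
  subst h; rw [answerAltLoop]; simp

theorem erase_last (l : List Int) (a : Int) : (l ++ [a]).eraseIdx l.length = l := by
  rw [List.eraseIdx_eq_take_drop_succ]; simp

theorem erase_mid (l : List Int) (a b : Int) : (l ++ [a, b]).eraseIdx l.length = l ++ [b] := by
  rw [List.eraseIdx_eq_take_drop_succ, List.take_append_of_le_length (le_refl _)]
  simp

theorem set_last (l : List Int) (a v : Int) : (l ++ [a]).set l.length v = l ++ [v] := by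
  rw [List.set_append_right _ _ (le_refl _)]; simp

theorem loop1_eq (k : Int) (xs : List Int) (index : Nat) (num : Int) :
    answerLoop1 k xs index num =
    (xs.take index ++ (xs.drop index).filter (fun x => decide (x < k)),
     num + ((xs.drop index).countP (fun x => decide (k ≤ x)) : Int)) := by
  fun_induction answerLoop1 k xs index num with
  | case1 xs index num h hge ih =>
      rw [ih, List.eraseIdx_eq_take_drop_succ]
      have ht : (xs.take index).length = index := by simp; omega
      have h1 : ((xs.take index ++ xs.drop (index+1)).take index) = xs.take index := by
        rw [List.take_append_of_le_length (by omega), List.take_take, min_self]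
      have h2 : ((xs.take index ++ xs.drop (index+1)).drop index) = xs.drop (index+1) :=
        List.drop_left' ht
      have hfc : (xs.drop index).filter (fun x => decide (x < k))
          = (xs.drop (index+1)).filter (fun x => decide (x < k)) := by
        rw [List.drop_eq_getElem_cons h, List.filter_cons]
        simp [not_lt.mpr hge]
      have hcc : (xs.drop index).countP (fun x => decide (k ≤ x))
          = (xs.drop (index+1)).countP (fun x => decide (k ≤ x)) + 1 := by
        rw [List.drop_eq_getElem_cons h, List.countP_cons]
        simp [hge]
      rw [h1, h2, hfc, hcc]
      exact Prod.ext rfl (by push_cast; ring)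
  | case2 xs index num h hlt ih =>
      rw [ih]
      have hlt' : xs[index] < k := not_le.mp hlt
      have h4 : xs.take (index+1) = xs.take index ++ [xs[index]] := by
        rw [List.take_add_one, List.getElem?_eq_getElem h]; rfl
      have hfc : (xs.drop index).filter (fun x => decide (x < k))
          = xs[index] :: (xs.drop (index+1)).filter (fun x => decide (x < k)) := by
        rw [List.drop_eq_getElem_cons h, List.filter_cons]
        simp [hlt']
      have hcc : (xs.drop index).countP (fun x => decide (k ≤ x))
          = (xs.drop (index+1)).countP (fun x => decide (k ≤ x)) := by
        rw [List.drop_eq_getElem_cons h, List.countP_cons]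
        simp [not_le.mpr hlt']
      rw [h4, hfc, hcc, List.append_assoc]
      rfl
  | case3 xs index num h =>
      rw [List.take_of_length_le (by omega), List.drop_eq_nil_of_le (by omega)]
      simp

theorem phase2_concat (k b s num : Int) (l : List Int) :
    phase2 k (l ++ [b]) s num = if s = k then phase2 k l b (num + 1) else phase2 k l (s + 1) num := by
  rw [phase2, dif_neg (by simp)]
  simp

theorem loop2_eq (k : Int) : ∀ (ys : List Int) (s num : Int),
    answerFinish k (answerLoop2 k (ys ++ [s]) (ys.length : Int) num) = phase2 k ys s num := by
  intro ys
  induction ys using List.reverseRecOn with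
  | nil =>
      intro s num
      rw [answerLoop2, dif_neg (by simp), phase2, dif_pos rfl]
      simp [answerFinish, PySem.List.pyGet?_zero_cons]
  | append_singleton ys' s' ih =>
      intro s num
      rw [phase2_concat]
      rw [answerLoop2, dif_pos (by
        have : 0 < (ys' ++ [s']).length := by simp
        exact_mod_cast this)]
      have hget : PySem.List.pyGetD ((ys' ++ [s']) ++ [s]) (((ys' ++ [s']).length : Nat) : Int) 0 = s := by
        rw [PySem.List.pyGetD_natCast]
        simp [List.getD_eq_getElem?_getD, List.getElem?_concat_length]
      rw [hget]
      have hidx : (((ys' ++ [s']).length : Nat) : Int) - 1 = ((ys'.length : Nat) : Int) := by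
        simp
      by_cases hs : s = k
      · rw [if_pos hs, if_pos hs]
        have hpop : PySem.List.pop? ((ys' ++ [s']) ++ [s]) (((ys' ++ [s']).length : Nat) : Int)
            = some (s, ys' ++ [s']) := by
          rw [PySem.List.pop?_natCast _ _ (by simp)]
          rw [erase_last]
          simp [List.getElem_concat_length]
        rw [hpop, hidx]
        simp only [Option.map_some, Option.getD_some]
        exact ih s' (num + 1)
      · rw [if_neg hs, if_neg hs]
        have hset : PySem.List.pySetD ((ys' ++ [s']) ++ [s]) (((ys' ++ [s']).length : Nat) : Int) (s + 1)
            = ys' ++ [s', s + 1] := by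
          rw [PySem.List.pySetD_natCast, set_last]
          simp
        rw [hset, hidx]
        have hpop : PySem.List.pop? (ys' ++ [s', s + 1]) ((ys'.length : Nat) : Int)
            = some (s', ys' ++ [s + 1]) := by
          rw [PySem.List.pop?_natCast _ _ (by simp)]
          rw [erase_mid]
          simp [List.getElem_append_right]
        rw [hpop]
        simp only [Option.map_some, Option.getD_some]
        exact ih (s + 1) num

theorem altLoop_step (k s : Int) (l : List Int) (x num : Int) (hs : s < k)
    (h1 : ∀ y ∈ l ++ [x] ++ [s], y ≤ k) (h2 : ∀ y ∈ l ++ [s + 1], y ≤ k) :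
    answerAltLoop k (l ++ [x] ++ [s]) h1 num = answerAltLoop k (l ++ [s + 1]) h2 num := by
  conv_lhs => rw [answerAltLoop]
  conv_rhs => rw [answerAltLoop]
  rw [dif_neg (by simp : ¬(l ++ [x] ++ [s] = [])), dif_neg (by simp : ¬(l ++ [s + 1] = []))]
  simp only [PySem.List.pyGetD_neg_one_append_singleton, PySem.List.len_eq,
    List.length_append, List.length_cons, List.length_nil, Nat.zero_add]
  split_ifs with c1 c2 c2
  · rfl
  · exfalso; push_cast at c1 c2; omega
  · exfalso; push_cast at c1 c2; omega
  · apply altLoop_eq_of_eq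
    rw [PySem.List.slice_to _ (by push_cast at c1 ⊢; omega),
        PySem.List.slice_to _ (by push_cast at c2 ⊢; omega)]
    have hbn : (((l.length + 1 + 1 : Nat) : Int) - (k - s) - 1).toNat
        = (((l.length + 1 : Nat) : Int) - (k - (s + 1)) - 1).toNat := by
      push_cast; omega
    rw [hbn, List.append_assoc]
    rw [List.take_append_of_le_length (by push_cast at c2 ⊢; omega),
        List.take_append_of_le_length (by push_cast at c2 ⊢; omega)]

theorem phase2_eq_altLoop (k : Int) : ∀ (ys : List Int) (s num : Int), s ≤ k → (∀ x ∈ ys, x < k) →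
    ∀ (h : ∀ x ∈ ys ++ [s], x ≤ k),
    phase2 k ys s num = answerAltLoop k (ys ++ [s]) h num := by
  intro ys
  induction ys using List.reverseRecOn with
  | nil =>
      intro s num hs _ h
      rw [phase2, dif_pos rfl]
      conv_rhs => rw [answerAltLoop]
      rw [dif_neg (by simp : ¬(([] : List Int) ++ [s] = []))]
      simp only [PySem.List.pyGetD_neg_one_append_singleton]
      by_cases hs' : s = k
      · subst s
        rw [if_pos rfl]
        rw [dif_neg (by
          rw [PySem.List.len_eq]
          have : 0 < (([] : List Int) ++ [k]).length := by simp
          omega)]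
        rw [altLoop_nil]
        rw [PySem.List.slice_to _ (by
          rw [PySem.List.len_eq]
          have : (([] : List Int) ++ [k]).length = 1 := by simp
          omega)]
        rw [show (PySem.List.len (([] : List Int) ++ [k]) - (k - k) - 1).toNat = 0 from by
          rw [PySem.List.len_eq]; simp]
        rfl
      · rw [if_neg hs']
        rw [dif_pos (by
          rw [PySem.List.len_eq]
          have : (([] : List Int) ++ [s]).length = 1 := by simp
          rw [this]
          push_cast
          omega)]
  | append_singleton ys' s' ih =>
      intro s num hs hys h
      have hys' : ∀ x ∈ ys', x < k := fun x hx => hys x (by simp [hx])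
      rw [phase2_concat]
      by_cases hs' : s = k
      · subst s
        rw [if_pos rfl]
        rw [ih s' (num + 1) (le_of_lt (hys s' (by simp))) hys' (fun x hx => le_of_lt (hys x hx))]
        conv_rhs => rw [answerAltLoop]
        rw [dif_neg (by simp : ¬((ys' ++ [s']) ++ [k] = []))]
        simp only [PySem.List.pyGetD_neg_one_append_singleton]
        rw [dif_neg (by
          rw [PySem.List.len_eq]
          have : 0 < ((ys' ++ [s']) ++ [k]).length := by simp
          omega)]
        have hsl : PySem.List.slice ((ys' ++ [s']) ++ [k]) none
            (some (PySem.List.len ((ys' ++ [s']) ++ [k]) - (k - k) - 1)) = ys' ++ [s'] := by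
          rw [PySem.List.slice_to _ (by
            rw [PySem.List.len_eq]
            have : 0 < ((ys' ++ [s']) ++ [k]).length := by simp
            omega)]
          rw [show (PySem.List.len ((ys' ++ [s']) ++ [k]) - (k - k) - 1).toNat
              = (ys' ++ [s']).length from by
            rw [PySem.List.len_eq]
            have : ((ys' ++ [s']) ++ [k]).length = (ys' ++ [s']).length + 1 := by simp
            omega]
          exact List.take_left ..
        exact altLoop_eq_of_eq hsl.symm
      · rw [if_neg hs']
        have hslt : s < k := lt_of_le_of_ne hs hs'
        have h2 : ∀ x ∈ ys' ++ [s + 1], x ≤ k := by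
          intro x hx
          rcases List.mem_append.mp hx with hx | hx
          · exact le_of_lt (hys' x hx)
          · simp at hx; omega
        rw [ih (s + 1) num (by omega) hys' h2]
        exact (altLoop_step k s ys' s' num hslt h h2).symm

theorem countP_ge_eq (ll : List Int) (k : Int) :
    ((ll.countP (fun x => decide (k ≤ x)) : Nat) : Int)
      = (ll.length : Int) - ((ll.filter (fun x => decide (x < k))).length : Int) := by
  have h := List.length_eq_countP_add_countP (l := ll) (fun x => decide (x < k))
  have h2 : List.countP (fun a => decide ¬decide (a < k) = true) ll
      = List.countP (fun x => decide (k ≤ x)) ll := by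
    apply List.countP_congr; intro a _; simp [not_lt]
  rw [h2] at h
  rw [← List.countP_eq_length_filter]
  omega

-- ===== VERDICT (by name: the statement is the Claim_ definition above) =====
theorem answer_spec : Claim_equal_answer := by
  intro ll k _ hpre
  unfold Spec_answer
  obtain ⟨x0, hx0, hx0k⟩ := hpre
  simp only [answer, answer_alt]
  rw [loop1_eq]
  simp only [List.take_zero, List.drop_zero, List.nil_append, zero_add]
  have hmne : PySem.List.sorted (ll.filter (fun x => decide (x < k))) (fun x => x) false ≠ [] := by
    have hf : x0 ∈ ll.filter (fun x => decide (x < k)) :=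
      List.mem_filter.mpr ⟨hx0, decide_eq_true hx0k⟩
    exact List.ne_nil_of_mem ((PySem.List.mem_sorted _ _ _ _).mpr hf)
  set m := PySem.List.sorted (ll.filter (fun x => decide (x < k))) (fun x => x) false with hm
  have hmlt : ∀ x ∈ m, x < k := fun x hx =>
    of_decide_eq_true (List.mem_filter.mp ((PySem.List.mem_sorted _ _ _ _).mp hx)).2
  have hdec : m.dropLast ++ [m.getLast hmne] = m := List.dropLast_append_getLast hmne
  have hpos : 0 < m.length := List.length_pos_iff.mpr hmne
  have hidx : PySem.List.len m - 1 = ((m.dropLast.length : Nat) : Int) := by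
    simp only [PySem.List.len_eq, List.length_dropLast]; omega
  have hloop := loop2_eq k m.dropLast (m.getLast hmne)
      ((ll.countP (fun x => decide (k ≤ x)) : Nat) : Int)
  rw [hdec] at hloop
  rw [hidx, hloop]
  rw [phase2_eq_altLoop k m.dropLast (m.getLast hmne) _
    (le_of_lt (hmlt _ (List.getLast_mem hmne)))
    (fun x hx => hmlt x (List.mem_of_mem_dropLast hx))
    (by intro x hx; rw [hdec] at hx; exact le_of_lt (hmlt x hx))]
  have hnum : ((ll.countP (fun x => decide (k ≤ x)) : Nat) : Int)
      = PySem.List.len ll - PySem.List.len m := by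
    simp only [hm, PySem.List.len_eq, PySem.List.length_sorted]
    exact countP_ge_eq ll k
  rw [hnum]
  exact altLoop_eq_of_eq hdec
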